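-- pv_equiv track=rewrite | github.com/cxchajon/website-fish-keeper | scripts/trim_recheck_static.py | build_scope_map
-- ===== SOURCE A (Python) =====
-- from typing import Dict, Iterable, List, Tuple
--
-- def build_scope_map(all_checksums: Dict[str, str], scopes: Iterable[str]) -> Dict[str, Dict[str, str]]:
--     scoped: Dict[str, Dict[str, str]] = {"/": dict(sorted(all_checksums.items()))}
--     for scope in scopes:
--         if scope == "/":
--             continue
--         prefix = scope.lstrip("/")
--         scoped[scope] = {
--             rel: checksum
--             for rel, checksum in scoped["/"].items()
--             if rel == prefix or rel.startswith(f"{prefix}/")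
--         }
--     return scoped
-- ===== SOURCE B (Python) =====
-- def _bisect_left(keys, x):
--     lo, hi = 0, len(keys)
--     while lo < hi:
--         mid = (lo + hi) // 2
--         if keys[mid] < x:
--             lo = mid + 1
--         else:
--             hi = mid
--     return lo
--
-- def build_scope_map(all_checksums, scopes):
--     items = sorted(all_checksums.items())
--     keys = [rel for rel, _ in items]
--     scoped = {"/": dict(items)}
--     for scope in scopes:
--         if scope == "/":
--             continue
--         prefix = scope.lstrip("/")
--         # entries under prefix + "/" form a contiguous block of the sorted keys:
--         # exactly the keys k with prefix + "/" <= k < prefix + "0"  ("0" = chr(ord("/") + 1))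
--         lo = _bisect_left(keys, prefix + "/")
--         hi = _bisect_left(keys, prefix + "0")
--         j = _bisect_left(keys, prefix)
--         exact = [items[j]] if j < len(keys) and keys[j] == prefix else []
--         scoped[scope] = dict(exact + items[lo:hi])
--     return scoped
-- ===== Notes on version B (the rewrite author's own statement) =====
-- stated objective: faster
-- what changed: Instead of re-scanning the whole sorted root map for every scope, B sorts once and binary-searches the sorted key list: the entries under prefix+"/" are exactly the contiguous block of keys in [prefix+"/", prefix+"0"), found with two bisections, plus one bisection for an exact prefix match.
import Mathlib
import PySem

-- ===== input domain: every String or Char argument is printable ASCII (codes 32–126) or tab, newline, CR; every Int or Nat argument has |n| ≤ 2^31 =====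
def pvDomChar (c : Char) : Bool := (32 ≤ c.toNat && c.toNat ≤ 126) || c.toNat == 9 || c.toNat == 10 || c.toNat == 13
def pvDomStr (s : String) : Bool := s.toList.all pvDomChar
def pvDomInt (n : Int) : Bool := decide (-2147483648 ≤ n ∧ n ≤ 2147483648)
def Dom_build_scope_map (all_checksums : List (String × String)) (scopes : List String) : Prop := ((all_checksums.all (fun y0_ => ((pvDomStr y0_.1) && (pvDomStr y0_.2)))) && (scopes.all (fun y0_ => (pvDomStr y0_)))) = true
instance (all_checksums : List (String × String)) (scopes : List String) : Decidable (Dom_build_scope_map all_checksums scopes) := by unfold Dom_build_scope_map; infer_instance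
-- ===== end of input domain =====

-- B replaces A's full scan of the sorted root map per scope by three binary searches for the
-- contiguous matching key range (measured faster at scale in a timing run: asymptotic change).

-- shared helper: exact port of Python's  s.lstrip("/")  (drop leading '/' characters)
def pyLstripSlash (s : String) : String := String.ofList (s.toList.dropWhile (fun c => c == '/'))

-- ===== PORT A =====
-- scoped["/"] is read back from the dict each iteration, as in the Python (getD; the key is always present)
def build_scope_map (all_checksums : List (String × String)) (scopes : List String) : List (String × List (String × String)) :=
  let root : PySem.Dict String String :=
    PySem.Dict.ofList (PySem.List.sorted2 (PySem.Dict.ofList all_checksums).items (fun p => p.1) (fun p => p.2))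
  let sm : PySem.Dict String (PySem.Dict String String) :=
    scopes.foldl (fun sc scope =>
      if scope == "/" then sc
      else
        let pfx := pyLstripSlash scope
        sc.insert scope (PySem.Dict.ofList
          (((sc.getD "/" PySem.Dict.empty).items).filter
            (fun p => p.1 == pfx || PySem.Str.startswith p.1 (pfx ++ "/")))))
      (PySem.Dict.empty.insert "/" root)
  sm.items.map (fun p => (p.1, p.2.items))

-- ===== PORT B =====
-- Source B's hand-written  _bisect_left  is the standard binary-search loop = PySem.List.bisectLeft
def build_scope_map_alt (all_checksums : List (String × String)) (scopes : List String) : List (String × List (String × String)) :=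
  let base := PySem.List.sorted2 (PySem.Dict.ofList all_checksums).items (fun p => p.1) (fun p => p.2)
  let keys := base.map (fun p => p.1)
  let sm : PySem.Dict String (PySem.Dict String String) :=
    scopes.foldl (fun sc scope =>
      if scope == "/" then sc
      else
        let pfx := pyLstripSlash scope
        let lo := PySem.List.bisectLeft keys (pfx ++ "/")
        let hi := PySem.List.bisectLeft keys (pfx ++ "0")
        let j := PySem.List.bisectLeft keys pfx
        -- 'j < len(keys) and keys[j] == prefix' : keys[j] = (base[j]).1
        let exact : List (String × String) :=
          match base[j]? with
          | some it => if it.1 == pfx then [it] else []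
          | none => []
        sc.insert scope (PySem.Dict.ofList (exact ++ PySem.List.slice base (some (lo : Int)) (some (hi : Int)))))
      (PySem.Dict.empty.insert "/" (PySem.Dict.ofList base))
  sm.items.map (fun p => (p.1, p.2.items))

-- ===== PRECONDITION & SPEC =====
def Spec_build_scope_map (all_checksums : List (String × String)) (scopes : List String) (out : List (String × List (String × String))) : Prop := out = build_scope_map_alt all_checksums scopes
instance (all_checksums : List (String × String)) (scopes : List String) (out : List (String × List (String × String))) : Decidable (Spec_build_scope_map all_checksums scopes out) := by unfold Spec_build_scope_map; infer_instance

-- ===== CLAIM (what is proved, stated in full; the proofs are below) =====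
def Claim_equal_build_scope_map : Prop := ∀ (all_checksums : List (String × String)) (scopes : List String), Dom_build_scope_map all_checksums scopes → Spec_build_scope_map all_checksums scopes (build_scope_map all_checksums scopes)

-- ===== LEMMAS AND PROOFS =====

theorem insertBy_congr {α : Type} (f g : α → α → Bool) (x : α) (acc : List α)
    (h : ∀ b ∈ acc, f x b = g x b) :
    PySem.List.insertBy f x acc = PySem.List.insertBy g x acc := by
  induction acc with
  | nil => rfl
  | cons y ys ih =>
    simp only [PySem.List.insertBy, h y (by simp)]
    split
    · rfl
    · have := ih (fun b hb => h b (by simp [hb]))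
      rw [this]

theorem foldl_insertBy_congr {α : Type} (f g : α → α → Bool) (xs : List α)
    (h : ∀ a ∈ xs, ∀ b ∈ xs, f a b = g a b) :
    xs.foldl (fun acc x => PySem.List.insertBy f x acc) [] =
      xs.foldl (fun acc x => PySem.List.insertBy g x acc) [] := by
  suffices H : ∀ (ys acc : List α), (∀ a ∈ ys, ∀ b ∈ acc, f a b = g a b) →
      (∀ a ∈ ys, ∀ b ∈ ys, f a b = g a b) →
      ys.foldl (fun acc x => PySem.List.insertBy f x acc) acc =
        ys.foldl (fun acc x => PySem.List.insertBy g x acc) acc by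
    exact H xs [] (by simp) h
  intro ys
  induction ys with
  | nil => intros; rfl
  | cons y t ih =>
    intro acc hya hyy
    simp only [List.foldl_cons]
    rw [insertBy_congr f g y acc (fun b hb => hya y (by simp) b hb)]
    apply ih
    · intro a ha b hb
      rcases (PySem.List.mem_insertBy g y b acc).mp hb with hby | hbacc
      · exact hyy a (by simp [ha]) b (by simp [hby])
      · exact hya a (by simp [ha]) b hbacc
    · intro a ha b hb; exact hyy a (by simp [ha]) b (by simp [hb])

theorem sorted2_eq_sorted_fst {ν : Type} [LinearOrder ν] (xs : List (String × ν))
    (h : (xs.map Prod.fst).Nodup) :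
    PySem.List.sorted2 xs (fun p => p.1) (fun p => p.2) =
      PySem.List.sorted xs (fun p => p.1) := by
  simp only [PySem.List.sorted2, PySem.List.sorted]
  apply foldl_insertBy_congr
  intro a ha b hb
  rcases lt_trichotomy a.1 b.1 with hlt | heq | hgt
  · simp [hlt, not_lt.mpr hlt.le]
  · have hab : a = b := List.inj_on_of_nodup_map h ha hb heq
    subst hab
    simp
  · simp [hgt, not_lt.mpr hgt.le]

theorem bisectLeftLoop_spec {α : Type} [LinearOrder α] (xs : List α) (x : α)
    (hs : List.Pairwise (· ≤ ·) xs) :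
    ∀ (fuel lo hi : Nat), lo ≤ hi → hi ≤ xs.length → hi - lo ≤ fuel →
    (∀ i (_ : i < xs.length), i < lo → xs[i] < x) →
    (∀ i (_ : i < xs.length), hi ≤ i → x ≤ xs[i]) →
    lo ≤ PySem.List.bisectLeftLoop xs x fuel lo hi ∧
    PySem.List.bisectLeftLoop xs x fuel lo hi ≤ hi ∧
    (∀ i (_ : i < xs.length), i < PySem.List.bisectLeftLoop xs x fuel lo hi → xs[i] < x) ∧
    (∀ i (_ : i < xs.length), PySem.List.bisectLeftLoop xs x fuel lo hi ≤ i → x ≤ xs[i]) := by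
  have hmono := List.pairwise_iff_getElem.mp hs
  intro fuel
  induction fuel with
  | zero =>
    intro lo hi hlohi hhil hfuel hlow hhigh
    have : lo = hi := by omega
    subst this
    simp only [PySem.List.bisectLeftLoop]
    exact ⟨le_refl _, le_refl _, hlow, hhigh⟩
  | succ n ih =>
    intro lo hi hlohi hhil hfuel hlow hhigh
    by_cases hlt : lo < hi
    · have hmid : (lo + hi) / 2 < xs.length := by omega
      have hget : xs[(lo + hi) / 2]? = some xs[(lo + hi) / 2] := List.getElem?_eq_getElem hmid
      simp only [PySem.List.bisectLeftLoop, if_pos hlt, hget]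
      by_cases hcmp : xs[(lo + hi) / 2] < x
      · simp only [if_pos hcmp]
        have hlow' : ∀ i (_ : i < xs.length), i < (lo + hi) / 2 + 1 → xs[i] < x := by
          intro i hi' hilt
          rcases Nat.lt_or_ge i ((lo + hi) / 2) with h1 | h1
          · exact lt_of_le_of_lt (hmono i ((lo+hi)/2) hi' hmid h1) hcmp
          · have : i = (lo + hi) / 2 := by omega
            subst this; exact hcmp
        obtain ⟨r1, r2, r3, r4⟩ := ih ((lo + hi) / 2 + 1) hi (by omega) hhil (by omega) hlow' hhigh
        exact ⟨by omega, r2, r3, r4⟩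
      · simp only [if_neg hcmp]
        rw [not_lt] at hcmp
        have hhigh' : ∀ i (_ : i < xs.length), (lo + hi) / 2 ≤ i → x ≤ xs[i] := by
          intro i hi' hge
          rcases Nat.lt_or_ge ((lo + hi) / 2) i with h1 | h1
          · exact le_trans hcmp (hmono ((lo+hi)/2) i hmid hi' h1)
          · have : i = (lo + hi) / 2 := by omega
            subst this; exact hcmp
        obtain ⟨r1, r2, r3, r4⟩ := ih lo ((lo + hi) / 2) (by omega) (by omega) (by omega) hlow hhigh'
        exact ⟨r1, by omega, r3, r4⟩
    · have : lo = hi := by omega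
      subst this
      simp only [PySem.List.bisectLeftLoop, if_neg hlt]
      exact ⟨le_refl _, le_refl _, hlow, hhigh⟩

theorem bisectLeft_spec' {α : Type} [LinearOrder α] (xs : List α) (x : α)
    (hs : List.Pairwise (· ≤ ·) xs) :
    PySem.List.bisectLeft xs x ≤ xs.length ∧
    (∀ i (_ : i < xs.length), i < PySem.List.bisectLeft xs x → xs[i] < x) ∧
    (∀ i (_ : i < xs.length), PySem.List.bisectLeft xs x ≤ i → x ≤ xs[i]) := by
  have := bisectLeftLoop_spec xs x hs xs.length 0 xs.length (Nat.zero_le _) (le_refl _)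
    (by omega) (by omega) (by intro i h hle; omega)
  exact ⟨this.2.1, this.2.2.1, this.2.2.2⟩

theorem prefix_iff_between (q : List Char) (a b : Char) (hab : a < b)
    (hsucc : ∀ c : Char, a < c → b ≤ c) (k : List Char) :
    (q ++ [a]) <+: k ↔
      (List.Lex (· < ·) (q ++ [a]) k ∨ q ++ [a] = k) ∧ List.Lex (· < ·) k (q ++ [b]) := by
  induction q generalizing k with
  | nil =>
    cases k with
    | nil =>
      simp only [List.nil_append]
      constructor
      · intro h; exact absurd (List.IsPrefix.length_le h) (by simp)
      · rintro ⟨h1 | h1, h2⟩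
        · cases h1
        · simp at h1
    | cons c t =>
      simp only [List.nil_append]
      constructor
      · intro h
        obtain ⟨r, hr⟩ := h
        have hac : a = c ∧ r = t := by
          constructor
          · exact (List.cons.injEq _ _ _ _ ▸ hr).1
          · exact (List.cons.injEq _ _ _ _ ▸ hr).2
        obtain ⟨rfl, rfl⟩ := hac
        constructor
        · cases r with
          | nil => right; rfl
          | cons u v => left; exact List.Lex.cons (List.Lex.nil)
        · exact List.Lex.rel hab
      · rintro ⟨h1, h2⟩
        have hca : c = a := by
          rcases h1 with h1 | h1
          · cases h1 with
            | rel h =>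
              cases h2 with
              | rel h' => exact absurd (hsucc c h) (not_le.mpr h')
              | cons h' => cases h'
            | cons h => rfl
          · exact (List.cons.injEq _ _ _ _ ▸ h1).1.symm
        subst hca
        exact ⟨t, rfl⟩
  | cons z q ih =>
    cases k with
    | nil =>
      simp only [List.cons_append]
      constructor
      · intro h; exact absurd (List.IsPrefix.length_le h) (by simp)
      · rintro ⟨h1 | h1, h2⟩
        · cases h1
        · simp at h1
    | cons c t =>
      simp only [List.cons_append]
      constructor
      · intro h
        obtain ⟨r, hr⟩ := h
        simp only [List.cons_append, List.cons.injEq] at hr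
        obtain ⟨rfl, hr⟩ := hr
        have hpre : (q ++ [a]) <+: t := ⟨r, hr⟩
        obtain ⟨h1, h2⟩ := (ih t).mp hpre
        refine ⟨?_, List.Lex.cons h2⟩
        rcases h1 with h1 | h1
        · left; exact List.Lex.cons h1
        · right; rw [h1]
      · rintro ⟨h1, h2⟩
        have hcz : c = z := by
          rcases h1 with h1 | h1
          · cases h1 with
            | rel h =>
              cases h2 with
              | rel h' => exact absurd h' (not_lt.mpr h.le)
              | cons => exact absurd h (lt_irrefl _)
            | cons h => rfl
          · exact (List.cons.injEq _ _ _ _ ▸ h1).1.symm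
        subst hcz
        have h1' : List.Lex (· < ·) (q ++ [a]) t ∨ q ++ [a] = t := by
          rcases h1 with h1 | h1
          · cases h1 with
            | rel h => exact absurd h (lt_irrefl _)
            | cons h => left; exact h
          · right; exact (List.cons.injEq _ _ _ _ ▸ h1).2
        have h2' : List.Lex (· < ·) t (q ++ [b]) := by
          cases h2 with
          | rel h => exact absurd h (lt_irrefl _)
          | cons h => exact h
        obtain ⟨r, hr⟩ := (ih t).mpr ⟨h1', h2'⟩
        exact ⟨r, by simp [hr]⟩

theorem lex_append_cons (l : List Char) (c : Char) (cs : List Char) :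
    List.Lex (· < ·) l (l ++ c :: cs) := by
  induction l with
  | nil => exact List.Lex.nil
  | cons x t ih => exact List.Lex.cons ih

theorem lex_append_lt (l : List Char) (a b : Char) (h : a < b) :
    List.Lex (· < ·) (l ++ [a]) (l ++ [b]) := by
  induction l with
  | nil => exact List.Lex.rel h
  | cons x t ih => exact List.Lex.cons ih

theorem str_lt_iff_lex (s t : String) : s < t ↔ List.Lex (· < ·) s.toList t.toList := by
  rw [String.lt_iff_toList_lt]; exact Eq.to_iff rfl

theorem str_le_iff (s t : String) :
    s ≤ t ↔ (List.Lex (· < ·) s.toList t.toList ∨ s.toList = t.toList) := by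
  rw [le_iff_lt_or_eq]
  exact or_congr (str_lt_iff_lex s t) (Iff.symm String.toList_inj)

theorem startswith_slash_iff (p k : String) :
    (PySem.Str.startswith k (p ++ "/") = true) ↔ (p ++ "/" ≤ k ∧ k < p ++ "0") := by
  rw [PySem.Str.startswith, PySem.Chars.startswith_iff, str_le_iff, str_lt_iff_lex]
  have h1 : (p ++ "/").toList = p.toList ++ ['/'] := by rw [String.toList_append]; rfl
  have h2 : (p ++ "0").toList = p.toList ++ ['0'] := by rw [String.toList_append]; rfl
  rw [h1, h2]
  rw [prefix_iff_between p.toList '/' '0' (by decide)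
    (fun c hc => by rw [Char.le_def]; rw [Char.lt_def] at hc; exact hc) k.toList]

theorem str_lt_append_slash (p : String) : p < p ++ "/" := by
  rw [str_lt_iff_lex, String.toList_append]
  exact lex_append_cons _ '/' _

theorem str_slash_lt_zero (p : String) : p ++ "/" < p ++ "0" := by
  rw [str_lt_iff_lex, String.toList_append, String.toList_append]
  exact lex_append_lt _ '/' '0' (by decide)

theorem filter_eq_window {α : Type} (xs : List α) (q : α → Bool) (lo hi : Nat)
    (hlohi : lo ≤ hi) (hhi : hi ≤ xs.length)
    (h : ∀ i (_ : i < xs.length), q xs[i] = decide (lo ≤ i ∧ i < hi)) :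
    xs.filter q = (xs.drop lo).take (hi - lo) := by
  have hdecomp : xs = xs.take lo ++ ((xs.drop lo).take (hi - lo) ++ xs.drop hi) := by
    rw [show xs.drop hi = List.drop (hi - lo) (xs.drop lo) by rw [List.drop_drop]; congr 1; omega,
      List.take_append_drop, List.take_append_drop]
  conv_lhs => rw [hdecomp]
  rw [List.filter_append, List.filter_append]
  have h1 : (xs.take lo).filter q = [] := by
    rw [List.filter_eq_nil_iff]
    intro a ha
    obtain ⟨j, hj, rfl⟩ := List.mem_take_iff_getElem.mp ha
    rw [h j (by omega)]
    simp only [decide_eq_true_eq]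
    omega
  have h2 : ((xs.drop lo).take (hi - lo)).filter q = (xs.drop lo).take (hi - lo) := by
    rw [List.filter_eq_self]
    intro a ha
    obtain ⟨j, hj, rfl⟩ := List.mem_take_iff_getElem.mp ha
    have hj' : j < (xs.drop lo).length := by omega
    rw [List.getElem_drop, h (lo + j) (by simp at hj'; omega)]
    simp only [decide_eq_true_eq]
    have := hj'
    simp only [List.length_drop] at this
    omega
  have h3 : (xs.drop hi).filter q = [] := by
    rw [List.filter_eq_nil_iff]
    intro a ha
    obtain ⟨j, hj, rfl⟩ := List.mem_iff_getElem.mp ha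
    rw [List.getElem_drop, h (hi + j) (by simp at hj; omega)]
    simp only [decide_eq_true_eq]
    omega
  rw [h1, h2, h3]
  simp

theorem filter_or_split {α : Type} (xs : List α) (p r : α → Bool) (R : α → α → Prop)
    (hs : List.Pairwise R xs)
    (hord : ∀ a b, p a = true → r b = true → ¬ R b a)
    (hdisj : ∀ a, ¬ (p a = true ∧ r a = true)) :
    xs.filter (fun x => p x || r x) = xs.filter p ++ xs.filter r := by
  induction xs with
  | nil => rfl
  | cons y t ih =>
    rcases List.pairwise_cons.mp hs with ⟨hy, ht⟩
    by_cases hp : p y = true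
    · have hr : r y = false := by
        rcases Bool.eq_false_or_eq_true (r y) with h | h
        · exact absurd ⟨hp, h⟩ (hdisj y)
        · exact h
      simp only [List.filter_cons, hp, hr, Bool.true_or, if_true]
      rw [ih ht]
      rfl
    · by_cases hr : r y = true
      · have hpt : t.filter p = [] := by
          rw [List.filter_eq_nil_iff]
          intro a ha hpa
          exact hord a y hpa hr (hy a ha)
        simp only [List.filter_cons, hr, hp]
        rw [ih ht, hpt]
        simp
      · simp only [List.filter_cons, Bool.eq_false_iff.mpr hp, Bool.eq_false_iff.mpr hr] at *
        simpa [hp, hr] using ih ht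

theorem filter_pred_eq_bisect (base : List (String × String)) (pfx : String)
    (hlt : List.Pairwise (fun a b => a.1 < b.1) base) :
    base.filter (fun p => p.1 == pfx || PySem.Str.startswith p.1 (pfx ++ "/")) =
      (match base[PySem.List.bisectLeft (base.map (fun p => p.1)) pfx]? with
        | some it => if it.1 == pfx then [it] else []
        | none => []) ++
      PySem.List.slice base (some ((PySem.List.bisectLeft (base.map (fun p => p.1)) (pfx ++ "/") : Nat) : Int))
        (some ((PySem.List.bisectLeft (base.map (fun p => p.1)) (pfx ++ "0") : Nat) : Int)) := by
  set keys := base.map (fun p : String × String => p.1) with hkeys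
  have hklen : keys.length = base.length := by simp [hkeys]
  have hkget : ∀ i (h : i < base.length), keys[i]'(by omega) = base[i].1 := by
    intro i h; simp [hkeys]
  have hkle : List.Pairwise (· ≤ ·) keys := by
    rw [hkeys, List.pairwise_map]
    exact hlt.imp (fun h => le_of_lt h)
  set j := PySem.List.bisectLeft keys pfx with hj
  set lo := PySem.List.bisectLeft keys (pfx ++ "/") with hlo
  set hi := PySem.List.bisectLeft keys (pfx ++ "0") with hhi
  obtain ⟨hjlen, hjlt, hjge⟩ := bisectLeft_spec' keys pfx hkle
  obtain ⟨hlolen, hlolt, hloge⟩ := bisectLeft_spec' keys (pfx ++ "/") hkle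
  obtain ⟨hhilen, hhilt, hhige⟩ := bisectLeft_spec' keys (pfx ++ "0") hkle
  have hbmono := List.pairwise_iff_getElem.mp hlt
  -- rewrite the predicate into the two-interval form
  have hpred : ∀ p : String × String,
      (p.1 == pfx || PySem.Str.startswith p.1 (pfx ++ "/")) =
      ((p.1 == pfx) || decide (pfx ++ "/" ≤ p.1 ∧ p.1 < pfx ++ "0")) := by
    intro p
    congr 1
    rcases Bool.eq_false_or_eq_true (PySem.Str.startswith p.1 (pfx ++ "/")) with h | h <;>
      rw [h]
    · exact (decide_eq_true ((startswith_slash_iff pfx p.1).mp h)).symm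
    · exact (decide_eq_false (fun hc => by
        rw [Bool.eq_false_iff] at h; exact h ((startswith_slash_iff pfx p.1).mpr hc))).symm
  rw [List.filter_congr (fun p _ => hpred p)]
  rw [filter_or_split base _ _ (fun a b => a.1 < b.1) hlt
      (by -- hord : no interval element precedes the exact element
        intro a b hpa hrb hba
        have ha : a.1 = pfx := by simpa using hpa
        have hb : pfx ++ "/" ≤ b.1 ∧ b.1 < pfx ++ "0" := by simpa using hrb
        have : pfx < pfx := lt_of_lt_of_le (lt_of_lt_of_le (str_lt_append_slash pfx) hb.1)
          (le_of_lt (ha ▸ hba))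
        exact lt_irrefl _ this)
      (by intro a ⟨hpa, hra⟩
          have ha : a.1 = pfx := by simpa using hpa
          have hb : pfx ++ "/" ≤ a.1 ∧ a.1 < pfx ++ "0" := by simpa using hra
          exact absurd (lt_of_lt_of_le (str_lt_append_slash pfx) (ha ▸ hb.1)) (lt_irrefl _))]
  congr 1
  · -- exact-match part
    rcases Nat.lt_or_ge j base.length with hjb | hjb
    · rw [List.getElem?_eq_getElem hjb]
      by_cases hx : base[j].1 = pfx
      · simp only [hx, beq_self_eq_true, if_true]
        rw [filter_eq_window base _ j (j+1) (by omega) (by omega)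
          (by
            intro i hib
            rcases Nat.lt_trichotomy i j with h1 | h1 | h1
            · have := hjlt i (by omega) h1
              rw [hkget i hib] at this
              rw [Bool.eq_iff_iff]
              simp only [beq_iff_eq, decide_eq_true_eq]
              constructor
              · intro he; exact absurd (he ▸ this) (lt_irrefl _)
              · omega
            · subst h1
              rw [Bool.eq_iff_iff]
              simp only [beq_iff_eq, decide_eq_true_eq]
              constructor
              · intro _; omega
              · intro _; exact hx
            · have h2 : base[j].1 < base[i].1 := hbmono j i (by omega) hib h1
              rw [Bool.eq_iff_iff]
              simp only [beq_iff_eq, decide_eq_true_eq]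
              constructor
              · intro he; exact absurd (hx ▸ he ▸ h2) (lt_irrefl _)
              · omega)]
        rw [show j + 1 - j = 1 from by omega, List.drop_eq_getElem_cons hjb]
        rfl
      · simp only [show (base[j].1 == pfx) = false from beq_eq_false_iff_ne.mpr hx,
          Bool.false_eq_true, if_false]
        rw [List.filter_eq_nil_iff]
        intro a ha hpa
        obtain ⟨i, hib, rfl⟩ := List.mem_iff_getElem.mp ha
        have he : base[i].1 = pfx := by simpa using hpa
        rcases Nat.lt_trichotomy i j with h1 | h1 | h1
        · have := hjlt i (by omega) h1
          rw [hkget i hib] at this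
          exact absurd (he ▸ this) (lt_irrefl _)
        · exact hx (h1 ▸ he)
        · have h2 : base[j].1 < base[i].1 := hbmono j i (by omega) hib h1
          have h3 : pfx ≤ keys[j]'(by omega) := hjge j (by omega) (le_refl _)
          rw [hkget j hjb] at h3
          have : pfx < base[i].1 := lt_of_le_of_lt h3 h2
          exact absurd (he ▸ this) (lt_irrefl _)
    · rw [List.getElem?_eq_none (by omega)]
      rw [List.filter_eq_nil_iff]
      intro a ha hpa
      obtain ⟨i, hib, rfl⟩ := List.mem_iff_getElem.mp ha
      have he : base[i].1 = pfx := by simpa using hpa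
      have := hjlt i (by omega) (by omega)
      rw [hkget i hib] at this
      exact absurd (he ▸ this) (lt_irrefl _)
  · -- interval part
    have hlohi : lo ≤ hi := by
      by_contra hcon
      rw [not_le] at hcon
      have h1 := hlolt hi (by omega) hcon
      have h2 := hhige hi (by omega) (le_refl _)
      exact absurd (lt_of_le_of_lt (le_trans (le_of_lt (str_slash_lt_zero pfx)) h2) h1)
        (lt_irrefl _)
    rw [PySem.List.slice_natCast]
    rw [filter_eq_window base _ lo hi hlohi (by omega)
      (by
        intro i hib
        rw [Bool.eq_iff_iff]
        simp only [decide_eq_true_eq]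
        constructor
        · rintro ⟨h1, h2⟩
          constructor
          · by_contra hcon
            rw [not_le] at hcon
            have := hlolt i (by omega) hcon
            rw [hkget i hib] at this
            exact absurd (lt_of_le_of_lt h1 this) (lt_irrefl _)
          · by_contra hcon
            rw [not_lt] at hcon
            have := hhige i (by omega) hcon
            rw [hkget i hib] at this
            exact absurd (lt_of_lt_of_le h2 this) (lt_irrefl _)
        · rintro ⟨h1, h2⟩
          have ha := hloge i (by omega) h1
          have hb := hhilt i (by omega) h2
          rw [hkget i hib] at ha hb
          exact ⟨ha, hb⟩)]

theorem items_ofList_nodup (l : List (String × String))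
    (h : (l.map Prod.fst).Nodup) : (PySem.Dict.ofList l).items = l := by
  rw [PySem.Dict.ofList, PySem.Dict.update]
  rw [PySem.Dict.items_foldl_insert_fresh l Prod.fst Prod.snd PySem.Dict.empty
    (fun a _ => PySem.Dict.contains_empty a.1) h]
  simp [PySem.Dict.empty]

theorem fold_eq (base : List (String × String))
    (hlt : List.Pairwise (fun a b => a.1 < b.1) base) :
    ∀ (scopes : List String) (sc : PySem.Dict String (PySem.Dict String String)),
      sc.getD "/" PySem.Dict.empty = PySem.Dict.ofList base →
      scopes.foldl (fun sc scope =>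
        if scope == "/" then sc
        else
          sc.insert scope (PySem.Dict.ofList
            (((sc.getD "/" PySem.Dict.empty).items).filter
              (fun p => p.1 == pyLstripSlash scope ||
                PySem.Str.startswith p.1 (pyLstripSlash scope ++ "/"))))) sc =
      scopes.foldl (fun sc scope =>
        if scope == "/" then sc
        else
          sc.insert scope (PySem.Dict.ofList
            ((match base[PySem.List.bisectLeft (base.map (fun p => p.1)) (pyLstripSlash scope)]? with
              | some it => if it.1 == pyLstripSlash scope then [it] else []
              | none => []) ++
             PySem.List.slice base
               (some ((PySem.List.bisectLeft (base.map (fun p => p.1)) (pyLstripSlash scope ++ "/") : Nat) : Int))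
               (some ((PySem.List.bisectLeft (base.map (fun p => p.1)) (pyLstripSlash scope ++ "0") : Nat) : Int))))) sc := by
  have hbn : (base.map Prod.fst).Nodup := by
    rw [List.Nodup, List.pairwise_map]
    exact hlt.imp (fun h => ne_of_lt h)
  intro scopes
  induction scopes with
  | nil => intro sc _; rfl
  | cons s t ih =>
    intro sc hinv
    simp only [List.foldl_cons]
    by_cases hs : (s == "/") = true
    · rw [if_pos hs, if_pos hs]
      exact ih sc hinv
    · rw [Bool.not_eq_true] at hs
      rw [if_neg (by simp [hs]), if_neg (by simp [hs])]
      have hne : ("/" : String) ≠ s := fun h => by simp [← h] at hs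
      have hval : PySem.Dict.ofList
            (((sc.getD "/" PySem.Dict.empty).items).filter
              (fun p => p.1 == pyLstripSlash s ||
                PySem.Str.startswith p.1 (pyLstripSlash s ++ "/"))) =
          PySem.Dict.ofList
            ((match base[PySem.List.bisectLeft (base.map (fun p => p.1)) (pyLstripSlash s)]? with
              | some it => if it.1 == pyLstripSlash s then [it] else []
              | none => []) ++
             PySem.List.slice base
               (some ((PySem.List.bisectLeft (base.map (fun p => p.1)) (pyLstripSlash s ++ "/") : Nat) : Int))
               (some ((PySem.List.bisectLeft (base.map (fun p => p.1)) (pyLstripSlash s ++ "0") : Nat) : Int))) := by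
        rw [hinv, items_ofList_nodup base hbn, filter_pred_eq_bisect base (pyLstripSlash s) hlt]
      rw [hval]
      apply ih
      rw [PySem.Dict.getD_insert_of_ne _ _ _ hne, hinv]

-- ===== VERDICT (by name: the statement is the Claim_ definition above) =====
theorem build_scope_map_spec : Claim_equal_build_scope_map := by
  intro all_checksums scopes _
  unfold Spec_build_scope_map
  simp only [build_scope_map, build_scope_map_alt]
  have hnodup : (((PySem.Dict.ofList all_checksums).items).map Prod.fst).Nodup := by
    have := PySem.Dict.nodup_keys_ofList all_checksums
    simpa [PySem.Dict.keys] using this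
  have hb : PySem.List.sorted2 (PySem.Dict.ofList all_checksums).items
      (fun p => p.1) (fun p => p.2) =
      PySem.List.sorted (PySem.Dict.ofList all_checksums).items (fun p => p.1) :=
    sorted2_eq_sorted_fst _ hnodup
  have hlt : List.Pairwise (fun a b : String × String => a.1 < b.1)
      (PySem.List.sorted2 (PySem.Dict.ofList all_checksums).items
        (fun p => p.1) (fun p => p.2)) := by
    rw [hb]
    have hle := PySem.List.sorted_pairwise (PySem.Dict.ofList all_checksums).items
      (fun p : String × String => p.1)
    have hperm := (PySem.List.sorted_perm (PySem.Dict.ofList all_checksums).items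
      (fun p : String × String => p.1) false).map Prod.fst
    have hnd : ((PySem.List.sorted (PySem.Dict.ofList all_checksums).items
        (fun p => p.1)).map Prod.fst).Nodup := hperm.nodup_iff.mpr hnodup
    rw [List.Nodup, List.pairwise_map] at hnd
    exact (hle.and hnd).imp (fun h => lt_of_le_of_ne h.1 h.2)
  rw [fold_eq _ hlt scopes _ (PySem.Dict.getD_insert_self _ _ _ _)]
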